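-- pv_equiv track=rewrite | github.com/Duccs/WordGuess | taxi-model-search/taxi_model.py | is_move_blocked
-- ===== SOURCE A (Python) =====
-- OBSTACLES = [
-- (4, 0, '+'),
-- (4, 1, '-'),
-- (3, 0, '+'),
-- (3, 1, '-'),
-- (0, 1, '+'),
-- (0, 2, '-'),
-- (1, 1, '+'),
-- (1, 2, '-'),
-- (4, 2, '+'),
-- (4, 3, '-'),
-- (3, 2, '+'),
-- (3, 3, '-')
-- ]
--
-- def is_move_blocked(current_row, current_col, move):
--     for obstacle in OBSTACLES:
--         obs_row, obs_col, direction = obstacle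
--         if move == 'right' and direction == '+' and current_row == obs_row and current_col == obs_col:
--             return True
--         if move == 'left' and direction == '-' and current_row == obs_row and current_col == obs_col:
--             return True
--     return False
-- ===== SOURCE B (Python) =====
-- # The obstacle table encodes vertical walls between column boundaries:
-- # a '+' at (r, c) blocks moving right across boundary c, and its paired '-'
-- # at (r, c+1) blocks moving left across the same boundary. The walls sit at
-- # boundary 0 (rows 3,4), boundary 1 (rows 0,1) and boundary 2 (rows 3,4).
-- # So blockedness is a closed arithmetic condition; no table is consulted.
-- def is_move_blocked(current_row, current_col, move):
--     if move == 'right':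
--         boundary = current_col
--     elif move == 'left':
--         boundary = current_col - 1
--     else:
--         return False
--     if boundary == 1:
--         return current_row in (0, 1)
--     if boundary == 0 or boundary == 2:
--         return current_row in (3, 4)
--     return False
-- ===== Notes on version B (the rewrite author's own statement) =====
-- stated objective: alternative
-- what changed: Replaces the scan over the OBSTACLES table with a closed arithmetic condition: the move is mapped to the column boundary it crosses (col for right, col-1 for left) and blockedness is decided by which rows carry a wall at that boundary; no obstacle data structure remains.
import Mathlib
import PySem

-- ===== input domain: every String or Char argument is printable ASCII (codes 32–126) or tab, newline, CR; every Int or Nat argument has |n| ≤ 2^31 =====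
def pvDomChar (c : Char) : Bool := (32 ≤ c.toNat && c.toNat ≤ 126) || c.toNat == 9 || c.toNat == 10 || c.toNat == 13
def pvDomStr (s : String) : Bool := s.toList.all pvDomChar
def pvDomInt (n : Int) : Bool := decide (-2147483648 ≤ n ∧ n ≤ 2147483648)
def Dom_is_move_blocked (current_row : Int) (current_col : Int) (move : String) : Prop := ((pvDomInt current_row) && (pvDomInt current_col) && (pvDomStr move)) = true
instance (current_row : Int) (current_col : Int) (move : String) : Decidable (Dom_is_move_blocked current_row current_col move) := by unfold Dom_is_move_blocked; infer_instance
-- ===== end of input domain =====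

-- ===== PORT A =====
-- A scans OBSTACLES; B replaces the table by a closed arithmetic wall-boundary condition. Alternative formulation; equivalence is total.
def OBSTACLES : List (Int × Int × String) :=
  [(4, 0, "+"), (4, 1, "-"), (3, 0, "+"), (3, 1, "-"), (0, 1, "+"), (0, 2, "-"),
   (1, 1, "+"), (1, 2, "-"), (4, 2, "+"), (4, 3, "-"), (3, 2, "+"), (3, 3, "-")]

-- the for-loop with early return, as structural recursion over the obstacle list
def is_move_blocked_loop (current_row : Int) (current_col : Int) (move : String) :
    List (Int × Int × String) → Bool
  | [] => false
  | obstacle :: rest =>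
    let obs_row := obstacle.1; let obs_col := obstacle.2.1; let direction := obstacle.2.2
    if move == "right" && direction == "+" && current_row == obs_row && current_col == obs_col then
      true
    else if move == "left" && direction == "-" && current_row == obs_row && current_col == obs_col then
      true
    else is_move_blocked_loop current_row current_col move rest

def is_move_blocked (current_row : Int) (current_col : Int) (move : String) : Bool :=
  is_move_blocked_loop current_row current_col move OBSTACLES

-- ===== PORT B =====
-- the move crosses column boundary `col` (right) or `col - 1` (left); walls sit at
-- boundary 1 for rows 0,1 and at boundaries 0 and 2 for rows 3,4
def is_move_blocked_alt (current_row : Int) (current_col : Int) (move : String) : Bool :=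
  if move == "right" then
    (if current_col == 1 then current_row == 0 || current_row == 1
     else if current_col == 0 || current_col == 2 then current_row == 3 || current_row == 4
     else false)
  else if move == "left" then
    (if current_col - 1 == 1 then current_row == 0 || current_row == 1
     else if current_col - 1 == 0 || current_col - 1 == 2 then current_row == 3 || current_row == 4
     else false)
  else false

-- ===== PRECONDITION & SPEC =====
def Spec_is_move_blocked (current_row : Int) (current_col : Int) (move : String) (out : Bool) : Prop := out = is_move_blocked_alt current_row current_col move
instance (current_row : Int) (current_col : Int) (move : String) (out : Bool) : Decidable (Spec_is_move_blocked current_row current_col move out) := by unfold Spec_is_move_blocked; infer_instance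

-- ===== CLAIM =====
def Claim_equal_is_move_blocked : Prop := ∀ (current_row : Int) (current_col : Int) (move : String), Dom_is_move_blocked current_row current_col move → Spec_is_move_blocked current_row current_col move (is_move_blocked current_row current_col move)

-- ===== LEMMAS AND PROOFS =====

-- ===== VERDICT =====
theorem is_move_blocked_spec : Claim_equal_is_move_blocked := by
  intro current_row current_col move _
  unfold Spec_is_move_blocked
  simp only [is_move_blocked, is_move_blocked_loop, OBSTACLES, is_move_blocked_alt]
  by_cases hr : move = "right" <;> by_cases hl : move = "left" <;>
    simp_all [beq_iff_eq] <;> split_ifs <;> (try simp_all) <;>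
      (apply Bool.eq_iff_iff.mpr;
       simp only [Bool.or_eq_true, Bool.and_eq_true, decide_eq_true_eq, beq_iff_eq] <;> omega)
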